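-- pv_equiv track=rewrite | github.com/msh0576/RL_WCPS | DeepWNCS/Testbed/Control-side/serial_send.py | makeCRC
-- ===== SOURCE A (Python) =====
-- def makeCRC(crc, field):
-- 	value_crc = crc ^ (field << 8)
--
-- 	for i in range(8):
-- 		if ((value_crc & 32768) == 32768):
-- 			value_crc = (value_crc << 1) ^ 4129
-- 		else:
-- 			value_crc = value_crc << 1
--
-- 	return value_crc & 0xffff
-- ===== SOURCE B (Python) =====
-- def _crc_hi(v):
--     for _ in range(8):
--         if (v & 32768) == 32768:
--             v = (v << 1) ^ 4129
--         else:
--             v = v << 1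
--     return v & 0xffff
--
-- _TABLE = [_crc_hi(i << 8) for i in range(256)]
--
-- def makeCRC(crc, field):
--     return ((crc << 8) ^ _TABLE[((crc >> 8) ^ field) & 0xff]) & 0xffff
-- ===== Notes on version B (the rewrite author's own statement) =====
-- stated objective: faster
-- what changed: Replaces the per-call 8-iteration shift/XOR loop by a 256-entry lookup table built once at import time (each entry precomputed with that loop on i<<8), so each call does one table lookup plus a shift, xor and mask.
import Mathlib
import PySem

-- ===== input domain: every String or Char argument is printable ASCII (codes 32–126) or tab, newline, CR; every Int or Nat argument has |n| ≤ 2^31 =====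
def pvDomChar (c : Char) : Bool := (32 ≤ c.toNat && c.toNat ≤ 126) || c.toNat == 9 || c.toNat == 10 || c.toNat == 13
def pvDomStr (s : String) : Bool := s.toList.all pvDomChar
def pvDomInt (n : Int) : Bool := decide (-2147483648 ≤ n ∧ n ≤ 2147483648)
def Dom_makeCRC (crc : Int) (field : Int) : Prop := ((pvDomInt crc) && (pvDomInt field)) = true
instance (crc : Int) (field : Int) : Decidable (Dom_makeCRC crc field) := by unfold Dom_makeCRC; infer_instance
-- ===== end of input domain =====

-- B replaces A's per-call 8-iteration shift/XOR loop by a 256-entry table (built once with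
-- that same loop) and a single masked lookup; same return value on all int inputs.

-- ===== PORT A =====
def makeCRC (crc : Int) (field : Int) : Int :=
  let value_crc : Int := PySem.Int.bxor crc (field <<< (8:Nat))
  let value_crc : Int := (PySem.List.pyRange 0 8 1).foldl
    (fun value_crc _ =>
      if PySem.Int.band value_crc 32768 = 32768 then PySem.Int.bxor (value_crc <<< (1:Nat)) 4129
      else value_crc <<< (1:Nat)) value_crc
  PySem.Int.band value_crc 65535

-- ===== PORT B =====
-- Source B's helper _crc_hi: an 8-iteration shift/XOR loop, run once per table entry at build time
def crcHi (v : Int) : Int :=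
  let v : Int := (PySem.List.pyRange 0 8 1).foldl
    (fun v _ =>
      if PySem.Int.band v 32768 = 32768 then PySem.Int.bxor (v <<< (1:Nat)) 4129
      else v <<< (1:Nat)) v
  PySem.Int.band v 65535

-- Source B's _TABLE = [_crc_hi(i << 8) for i in range(256)]
def crcTable : List Int := (PySem.List.pyRange 0 256 1).map (fun (i : Int) => crcHi (i <<< (8:Nat)))

-- Source B's makeCRC; its table index is provably in [0, 255], so the getD default is never used
def makeCRC_alt (crc : Int) (field : Int) : Int :=
  PySem.Int.band
    (PySem.Int.bxor (crc <<< (8:Nat))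
      (PySem.List.pyGetD crcTable (PySem.Int.band (PySem.Int.bxor (crc >>> (8:Nat)) field) 255) 0))
    65535

-- ===== PRECONDITION & SPEC =====
def Spec_makeCRC (crc : Int) (field : Int) (out : Int) : Prop := out = makeCRC_alt crc field
instance (crc : Int) (field : Int) (out : Int) : Decidable (Spec_makeCRC crc field out) := by unfold Spec_makeCRC; infer_instance

-- ===== CLAIM (what is proved, stated in full; the proofs are below) =====
def Claim_equal_makeCRC : Prop := ∀ (crc : Int) (field : Int), Dom_makeCRC crc field → Spec_makeCRC crc field (makeCRC crc field)

-- ===== LEMMAS AND PROOFS =====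

theorem pvNatAddEqXor (x : Nat) : ∀ y : Nat, x &&& y = 0 → x + y = x ^^^ y := by
  induction x using Nat.strong_induction_on with
  | _ x ih =>
  intro y h
  rcases Nat.eq_zero_or_pos x with hx | hx
  · subst hx; simp
  · have hd : x / 2 &&& y / 2 = 0 := by rw [← Nat.and_div_two, h]
    have hm := @Nat.and_mod_two_pow x y 1
    rw [h] at hm
    norm_num at hm
    have ihh := ih (x / 2) (by omega) (y / 2) hd
    have e1 := Nat.div_add_mod (x ^^^ y) 2
    rw [Nat.xor_div_two, Nat.xor_mod_two_eq] at e1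
    have h2 : x % 2 + y % 2 = (x + y) % 2 := by
      have hnb : ¬(x % 2 = 1 ∧ y % 2 = 1) := by
        rintro ⟨h1, h3⟩; rw [h1, h3] at hm; exact absurd hm (by decide)
      omega
    omega

theorem pvNatSubAnd (x y : Nat) : x - (x &&& y) = x ^^^ (x &&& y) := by
  have hxz : x &&& (x &&& y) = x &&& y := by rw [← Nat.and_assoc, Nat.and_self]
  have hd : (x ^^^ (x &&& y)) &&& (x &&& y) = 0 := by
    rw [Nat.and_xor_distrib_right, hxz, Nat.and_self, Nat.xor_self]
  have hadd := pvNatAddEqXor (x ^^^ (x &&& y)) (x &&& y) hd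
  have hback : (x ^^^ (x &&& y)) ^^^ (x &&& y) = x := by
    rw [Nat.xor_assoc, Nat.xor_self, Nat.xor_zero]
  omega

theorem pvTbOfNat (n : Nat) (i : Nat) : ((n : Int)).testBit i = n.testBit i := rfl

theorem pvTbToNat (a : Int) (h : 0 ≤ a) (i : Nat) : a.testBit i = a.toNat.testBit i := by
  conv_lhs => rw [← Int.toNat_of_nonneg h]
  rfl

theorem pvTbNegSub (n : Nat) (i : Nat) : ((-(n : Int)) - 1).testBit i = !(n.testBit i) := by
  have : (-(n : Int)) - 1 = Int.negSucc n := by rw [Int.negSucc_eq]; ring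
  rw [this]
  rfl

theorem pvTbNeg (a : Int) (h : a < 0) (i : Nat) : a.testBit i = !(((-a) - 1).toNat.testBit i) := by
  cases a with
  | ofNat m => exact absurd h (by exact Int.not_lt.mpr (Int.natCast_nonneg m))
  | negSucc m =>
    have : ((-(Int.negSucc m)) - 1).toNat = m := by rw [Int.negSucc_eq]; omega
    rw [this]
    rfl

theorem pvIntExt (a b : Int) (h : ∀ i, a.testBit i = b.testBit i) : a = b := by
  cases a with
  | ofNat m =>
    cases b with
    | ofNat n =>
      have : m = n := Nat.eq_of_testBit_eq (fun i => h i)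
      rw [this]
    | negSucc n =>
      have hi := h (m + n)
      have h1 : m.testBit (m + n) = false :=
        Nat.testBit_eq_false_of_lt (lt_of_lt_of_le (Nat.lt_two_pow_self) (Nat.pow_le_pow_right (by norm_num) (by omega)))
      have h2 : n.testBit (m + n) = false :=
        Nat.testBit_eq_false_of_lt (lt_of_lt_of_le (Nat.lt_two_pow_self) (Nat.pow_le_pow_right (by norm_num) (by omega)))
      simp [Int.testBit, h1, h2] at hi
  | negSucc m =>
    cases b with
    | ofNat n =>
      have hi := h (m + n)
      have h1 : m.testBit (m + n) = false :=
        Nat.testBit_eq_false_of_lt (lt_of_lt_of_le (Nat.lt_two_pow_self) (Nat.pow_le_pow_right (by norm_num) (by omega)))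
      have h2 : n.testBit (m + n) = false :=
        Nat.testBit_eq_false_of_lt (lt_of_lt_of_le (Nat.lt_two_pow_self) (Nat.pow_le_pow_right (by norm_num) (by omega)))
      simp [Int.testBit, h1, h2] at hi
    | negSucc n =>
      have : m = n := Nat.eq_of_testBit_eq (fun i => by
        have hi := h i
        simp [Int.testBit] at hi
        exact hi)
      rw [this]

theorem pvTbBxor (a b : Int) (i : Nat) :
    (PySem.Int.bxor a b).testBit i = (a.testBit i ^^ b.testBit i) := by
  unfold PySem.Int.bxor
  split_ifs with h1 h2 h2
  · rw [pvTbOfNat, Nat.testBit_xor, ← pvTbToNat a h1, ← pvTbToNat b h2]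
  · rw [pvTbNegSub, Nat.testBit_xor, ← pvTbToNat a h1, pvTbNeg b (by omega) i]
    cases ha : (-a - 1).toNat.testBit i <;> cases hb : (-b - 1).toNat.testBit i <;>
      cases ha2 : a.testBit i <;> cases hb2 : b.testBit i <;> simp_all
  · rw [pvTbNegSub, Nat.testBit_xor, ← pvTbToNat b h2, pvTbNeg a (by omega) i]
    cases ha : (-a - 1).toNat.testBit i <;> cases hb : (-b - 1).toNat.testBit i <;>
      cases ha2 : a.testBit i <;> cases hb2 : b.testBit i <;> simp_all
  · rw [pvTbOfNat, Nat.testBit_xor, pvTbNeg a (by omega) i, pvTbNeg b (by omega) i]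
    cases ha : (-a - 1).toNat.testBit i <;> cases hb : (-b - 1).toNat.testBit i <;>
      cases ha2 : a.testBit i <;> cases hb2 : b.testBit i <;> simp_all

theorem pvTbBand (a b : Int) (i : Nat) :
    (PySem.Int.band a b).testBit i = (a.testBit i && b.testBit i) := by
  unfold PySem.Int.band
  split_ifs with h1 h2 h2
  · rw [pvTbOfNat, Nat.testBit_and, ← pvTbToNat a h1, ← pvTbToNat b h2]
  · rw [pvTbOfNat, pvNatSubAnd, Nat.testBit_xor, Nat.testBit_and, ← pvTbToNat a h1,
      pvTbNeg b (by omega) i]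
    cases ha : (-a - 1).toNat.testBit i <;> cases hb : (-b - 1).toNat.testBit i <;>
      cases ha2 : a.testBit i <;> cases hb2 : b.testBit i <;> simp_all
  · rw [pvTbOfNat, pvNatSubAnd, Nat.testBit_xor, Nat.testBit_and, ← pvTbToNat b h2,
      pvTbNeg a (by omega) i]
    cases ha : (-a - 1).toNat.testBit i <;> cases hb : (-b - 1).toNat.testBit i <;>
      cases ha2 : a.testBit i <;> cases hb2 : b.testBit i <;> simp_all
  · rw [pvTbNegSub, Nat.testBit_or, pvTbNeg a (by omega) i, pvTbNeg b (by omega) i]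
    cases ha : (-a - 1).toNat.testBit i <;> cases hb : (-b - 1).toNat.testBit i <;>
      cases ha2 : a.testBit i <;> cases hb2 : b.testBit i <;> simp_all

theorem pvShlDisj (m n : Nat) : (m <<< n) &&& (2 ^ n - 1) = 0 := by
  apply Nat.eq_of_testBit_eq
  intro i
  rw [Nat.testBit_and, Nat.testBit_shiftLeft, Nat.testBit_two_pow_sub_one, Nat.zero_testBit]
  rcases Nat.lt_or_ge i n with h | h
  · simp [Nat.not_le.mpr h]
  · simp [Nat.not_lt.mpr h]

theorem pvTbShl (a : Int) (n i : Nat) :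
    (a <<< n).testBit i = (decide (n ≤ i) && a.testBit (i - n)) := by
  cases a with
  | ofNat m =>
    rw [show ((Int.ofNat m) <<< n) = ((m <<< n : Nat) : Int) from (Int.natCast_shiftLeft m n).symm,
      pvTbOfNat, Nat.testBit_shiftLeft]
    simp only [ge_iff_le]
    rfl
  | negSucc m =>
    have hp : 0 < 2 ^ n := Nat.two_pow_pos n
    have hK : (Int.negSucc m) <<< n = -(((m + 1) * 2 ^ n : Nat) : Int) := by
      rw [← Int.shiftLeft_natCast_right, Int.shiftLeft_eq_mul_pow, Int.negSucc_eq]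
      push_cast
      ring
    have hsub : -(((m + 1) * 2 ^ n : Nat) : Int) = -((((m + 1) * 2 ^ n - 1 : Nat)) : Int) - 1 := by
      have h1 : 1 ≤ (m + 1) * 2 ^ n := Nat.one_le_iff_ne_zero.mpr (by positivity)
      generalize (m + 1) * 2 ^ n = K at *
      omega
    have hxor : ((m + 1) * 2 ^ n - 1 : Nat) = (m <<< n) ^^^ (2 ^ n - 1) := by
      rw [← pvNatAddEqXor _ _ (pvShlDisj m n), Nat.shiftLeft_eq]
      have hexp : (m + 1) * 2 ^ n = m * 2 ^ n + 2 ^ n := by ring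
      omega
    rw [hK, hsub, pvTbNegSub, hxor, Nat.testBit_xor, Nat.testBit_shiftLeft,
      Nat.testBit_two_pow_sub_one]
    rcases Nat.lt_or_ge i n with h | h
    · simp [Nat.not_le.mpr h, h]
    · simp [Nat.not_lt.mpr h, h, ge_iff_le, Int.testBit]

theorem pvTbShr (a : Int) (n i : Nat) : (a >>> n).testBit i = a.testBit (n + i) := by
  cases a with
  | ofNat m =>
    rw [show ((Int.ofNat m) >>> n) = ((m >>> n : Nat) : Int) from (Int.natCast_shiftRight m n).symm,
      pvTbOfNat, Nat.testBit_shiftRight]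
    rfl
  | negSucc m =>
    rw [Int.negSucc_shiftRight]
    show (!(m >>> n).testBit i) = !m.testBit (n + i)
    rw [Nat.testBit_shiftRight]

def pvStep (v : Int) : Int :=
  if PySem.Int.band v 32768 = 32768 then PySem.Int.bxor (v <<< (1:Nat)) 4129 else v <<< (1:Nat)

theorem pvTbZero (i : Nat) : (0 : Int).testBit i = false := by
  rw [show (0:Int) = ((0:Nat):Int) from rfl, pvTbOfNat]
  exact Nat.zero_testBit i

theorem pvTb32768 (i : Nat) : (32768 : Int).testBit i = decide (15 = i) := by
  rw [show (32768:Int) = ((2^15:Nat):Int) from by norm_num, pvTbOfNat, Nat.testBit_two_pow]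

theorem pvTb65535 (i : Nat) : (65535 : Int).testBit i = decide (i < 16) := by
  rw [show (65535:Int) = (((2^16 - 1 :Nat)):Int) from by norm_num, pvTbOfNat,
    Nat.testBit_two_pow_sub_one]

theorem pvTb255 (i : Nat) : (255 : Int).testBit i = decide (i < 8) := by
  rw [show (255:Int) = (((2^8 - 1 :Nat)):Int) from by norm_num, pvTbOfNat,
    Nat.testBit_two_pow_sub_one]

theorem pvBandBit15 (a : Int) : PySem.Int.band a 32768 = if a.testBit 15 then 32768 else 0 := by
  apply pvIntExt
  intro i
  rw [pvTbBand, pvTb32768]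
  by_cases h : a.testBit 15 <;> by_cases hi : i = 15 <;>
    simp [h, hi, pvTb32768, pvTbZero]
  · intro h'; omega
  · omega

theorem pvCond (a : Int) : (PySem.Int.band a 32768 = 32768) ↔ a.testBit 15 = true := by
  rw [pvBandBit15]
  by_cases h : a.testBit 15 <;> simp [h]


theorem pvBxorShl (a b : Int) (n : Nat) :
    (PySem.Int.bxor a b) <<< n = PySem.Int.bxor (a <<< n) (b <<< n) := by
  apply pvIntExt
  intro i
  simp only [pvTbShl, pvTbBxor]
  cases h : decide (n ≤ i) <;> simp

theorem pvBandBxor (a b c : Int) :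
    PySem.Int.band (PySem.Int.bxor a b) c
      = PySem.Int.bxor (PySem.Int.band a c) (PySem.Int.band b c) := by
  apply pvIntExt
  intro i
  simp only [pvTbBand, pvTbBxor]
  cases a.testBit i <;> cases b.testBit i <;> cases c.testBit i <;> rfl


theorem pvStepLin (a b : Int) :
    pvStep (PySem.Int.bxor a b) = PySem.Int.bxor (pvStep a) (pvStep b) := by
  unfold pvStep
  have hc : (PySem.Int.bxor a b).testBit 15 = (a.testBit 15 ^^ b.testBit 15) := pvTbBxor a b 15
  by_cases ha : a.testBit 15 = true <;> by_cases hb : b.testBit 15 = true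
  · rw [if_pos ((pvCond a).mpr ha), if_pos ((pvCond b).mpr hb),
      if_neg (by rw [pvCond, hc, ha, hb]; simp)]
    apply pvIntExt
    intro i
    simp only [pvTbBxor, pvTbShl]
    cases decide (1 ≤ i) <;> cases (4129:Int).testBit i <;>
      cases a.testBit (i-1) <;> cases b.testBit (i-1) <;> rfl
  · rw [if_pos ((pvCond a).mpr ha), if_neg (fun h => hb ((pvCond b).mp h)),
      if_pos (by rw [pvCond, hc, ha, Bool.eq_false_iff.mpr hb]; rfl)]
    apply pvIntExt
    intro i
    simp only [pvTbBxor, pvTbShl]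
    cases decide (1 ≤ i) <;> cases (4129:Int).testBit i <;>
      cases a.testBit (i-1) <;> cases b.testBit (i-1) <;> rfl
  · rw [if_neg (fun h => ha ((pvCond a).mp h)), if_pos ((pvCond b).mpr hb),
      if_pos (by rw [pvCond, hc, hb, Bool.eq_false_iff.mpr ha]; rfl)]
    apply pvIntExt
    intro i
    simp only [pvTbBxor, pvTbShl]
    cases decide (1 ≤ i) <;> cases (4129:Int).testBit i <;>
      cases a.testBit (i-1) <;> cases b.testBit (i-1) <;> rfl
  · rw [if_neg (fun h => ha ((pvCond a).mp h)), if_neg (fun h => hb ((pvCond b).mp h)),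
      if_neg (by rw [pvCond, hc, Bool.eq_false_iff.mpr ha, Bool.eq_false_iff.mpr hb]; simp)]
    exact pvBxorShl a b 1

theorem pvLoop8Lin (a b : Int) :
    pvStep (pvStep (pvStep (pvStep (pvStep (pvStep (pvStep (pvStep (PySem.Int.bxor a b))))))))
      = PySem.Int.bxor
          (pvStep (pvStep (pvStep (pvStep (pvStep (pvStep (pvStep (pvStep a))))))))
          (pvStep (pvStep (pvStep (pvStep (pvStep (pvStep (pvStep (pvStep b)))))))) := by
  simp only [pvStepLin]

theorem pvShl1 (x : Int) : x <<< (1:Nat) = 2 * x := by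
  rw [← Int.shiftLeft_natCast_right, Int.shiftLeft_eq_mul_pow]
  push_cast
  ring

theorem pvShl8 (x : Int) : x <<< (8:Nat) = 256 * x := by
  rw [← Int.shiftLeft_natCast_right, Int.shiftLeft_eq_mul_pow]
  push_cast
  ring

theorem pvStepSmall (x : Int) (h0 : 0 ≤ x) (h1 : x < 32768) : pvStep x = 2 * x := by
  unfold pvStep
  rw [if_neg, pvShl1]
  rw [pvCond, pvTbToNat x h0]
  simp only [Bool.not_eq_true]
  exact Nat.testBit_eq_false_of_lt (by omega)

theorem pvLoopLow (l : Int) (h0 : 0 ≤ l) (h1 : l < 256) :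
    pvStep (pvStep (pvStep (pvStep (pvStep (pvStep (pvStep (pvStep l))))))) = l <<< (8:Nat) := by
  rw [pvStepSmall l h0 (by omega),
      pvStepSmall (2 * l) (by omega) (by omega),
      pvStepSmall (2 * (2 * l)) (by omega) (by omega),
      pvStepSmall (2 * (2 * (2 * l))) (by omega) (by omega),
      pvStepSmall (2 * (2 * (2 * (2 * l)))) (by omega) (by omega),
      pvStepSmall (2 * (2 * (2 * (2 * (2 * l))))) (by omega) (by omega),
      pvStepSmall (2 * (2 * (2 * (2 * (2 * (2 * l)))))) (by omega) (by omega),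
      pvStepSmall (2 * (2 * (2 * (2 * (2 * (2 * (2 * l))))))) (by omega) (by omega),
      pvShl8]
  ring

theorem pvLowZero (x : Int) (h : PySem.Int.band x 65535 = 0) {i : Nat} (hi : i < 16) :
    x.testBit i = false := by
  have hb := congrArg (fun t => Int.testBit t i) h
  simp only [pvTbBand, pvTb65535, pvTbZero] at hb
  simpa [hi] using hb

theorem pvStepHigh (x : Int) (h : PySem.Int.band x 65535 = 0) :
    PySem.Int.band (pvStep x) 65535 = 0 := by
  unfold pvStep
  rw [if_neg (by rw [pvCond]; simp [pvLowZero x h (by norm_num : (15:Nat) < 16)])]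
  apply pvIntExt
  intro i
  simp only [pvTbBand, pvTbShl, pvTb65535, pvTbZero]
  rcases Nat.lt_or_ge i 16 with hi | hi
  · rcases Nat.eq_zero_or_pos i with h0 | h0
    · simp [h0]
    · have h1i : decide (1 ≤ i) = true := by simp; omega
      have hz : x.testBit (i - 1) = false := pvLowZero x h (by omega)
      simp [h1i, hz]
  · simp [Nat.not_lt.mpr hi]

theorem pvLoopHigh (x : Int) (h : PySem.Int.band x 65535 = 0) :
    PySem.Int.band
      (pvStep (pvStep (pvStep (pvStep (pvStep (pvStep (pvStep (pvStep x)))))))) 65535 = 0 :=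
  pvStepHigh _ (pvStepHigh _ (pvStepHigh _ (pvStepHigh _ (pvStepHigh _ (pvStepHigh _
    (pvStepHigh _ (pvStepHigh _ h)))))))

theorem pvBandBounds (a b : Int) (hb : 0 ≤ b) : 0 ≤ PySem.Int.band a b ∧ PySem.Int.band a b ≤ b := by
  unfold PySem.Int.band
  rcases (show (0:Int) ≤ a ∨ a < 0 by omega) with h1 | h1
  · rw [if_pos h1, if_pos hb]
    have : a.toNat &&& b.toNat ≤ b.toNat := Nat.and_le_right
    constructor
    · positivity
    · omega
  · rw [if_neg (by omega), if_pos hb]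
    constructor
    · positivity
    · have : b.toNat - (b.toNat &&& (-a - 1).toNat) ≤ b.toNat := by omega
      omega

theorem pvBandSmall (x : Int) (h0 : 0 ≤ x) (h1 : x < 65536) : PySem.Int.band x 65535 = x := by
  apply pvIntExt
  intro i
  simp only [pvTbBand, pvTb65535]
  rcases Nat.lt_or_ge i 16 with hi | hi
  · simp [hi]
  · have : x.testBit i = false := by
      rw [pvTbToNat x h0]
      exact Nat.testBit_eq_false_of_lt
        (lt_of_lt_of_le (by omega) (Nat.pow_le_pow_right (by norm_num) hi))
    simp [this, Nat.not_lt.mpr hi]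

theorem pvSplitHL (u : Int) :
    u = PySem.Int.bxor ((u >>> (8:Nat)) <<< (8:Nat)) (PySem.Int.band u 255) := by
  apply pvIntExt
  intro i
  simp only [pvTbBxor, pvTbShl, pvTbShr, pvTbBand, pvTb255]
  rcases Nat.lt_or_ge i 8 with hi | hi
  · simp [Nat.not_le.mpr hi, hi]
  · have : 8 + (i - 8) = i := by omega
    simp [hi, this, Nat.not_lt.mpr hi]

theorem pvRInv (v : Int) :
    PySem.Int.band (PySem.Int.bxor v (PySem.Int.band v 65535)) 65535 = 0 := by
  apply pvIntExt
  intro i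
  simp only [pvTbBand, pvTbBxor, pvTb65535, pvTbZero]
  rcases Nat.lt_or_ge i 16 with hi | hi <;> simp [hi]

theorem pvVDecomp (v : Int) :
    v = PySem.Int.bxor (PySem.Int.band v 65535) (PySem.Int.bxor v (PySem.Int.band v 65535)) := by
  apply pvIntExt
  intro i
  simp only [pvTbBxor]
  cases v.testBit i <;> cases (PySem.Int.band v 65535).testBit i <;> rfl

theorem pvLuEq (crc field : Int) :
    PySem.Int.band (PySem.Int.band (PySem.Int.bxor crc (field <<< (8:Nat))) 65535) 255
      = PySem.Int.band crc 255 := by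
  apply pvIntExt
  intro i
  simp only [pvTbBand, pvTbBxor, pvTbShl, pvTb65535, pvTb255]
  rcases Nat.lt_or_ge i 8 with hi | hi
  · simp [hi, Nat.not_le.mpr hi, show i < 16 by omega]
  · simp [Nat.not_lt.mpr hi]

theorem pvHuEq (crc field : Int) :
    (PySem.Int.band (PySem.Int.bxor crc (field <<< (8:Nat))) 65535) >>> (8:Nat)
      = PySem.Int.band (PySem.Int.bxor (crc >>> (8:Nat)) field) 255 := by
  apply pvIntExt
  intro i
  simp only [pvTbBand, pvTbBxor, pvTbShl, pvTbShr, pvTb65535, pvTb255]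
  rcases Nat.lt_or_ge i 8 with hi | hi
  · have h1 : 8 + i - 8 = i := by omega
    simp [hi, h1, show 8 + i < 16 by omega, show (8:Nat) ≤ 8 + i by omega]
  · have h2 : ¬ (8 + i < 16) := by omega
    simp [h2, Nat.not_lt.mpr hi]

theorem pvCrcShl (crc : Int) :
    PySem.Int.band (crc <<< (8:Nat)) 65535 = (PySem.Int.band crc 255) <<< (8:Nat) := by
  apply pvIntExt
  intro i
  simp only [pvTbBand, pvTbShl, pvTb65535, pvTb255]
  rcases Nat.lt_or_ge i 8 with hi | hi
  · simp [Nat.not_le.mpr hi]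
  · rcases Nat.lt_or_ge i 16 with hj | hj
    · simp [hi, hj, show i - 8 < 8 by omega]
    · simp [hi, Nat.not_lt.mpr hj, show ¬ (i - 8 < 8) by omega]

theorem pvBandBandSelf (a : Int) :
    PySem.Int.band (PySem.Int.band a 65535) 65535 = PySem.Int.band a 65535 := by
  apply pvIntExt
  intro i
  simp only [pvTbBand]
  cases a.testBit i <;> cases (65535:Int).testBit i <;> rfl

def pvS8 (x : Int) : Int :=
  pvStep (pvStep (pvStep (pvStep (pvStep (pvStep (pvStep (pvStep x)))))))

theorem pvRange8 : PySem.List.pyRange 0 8 1 = [0, 1, 2, 3, 4, 5, 6, 7] := by decide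

theorem pvS8Lin (a b : Int) : pvS8 (PySem.Int.bxor a b) = PySem.Int.bxor (pvS8 a) (pvS8 b) := by
  unfold pvS8
  exact pvLoop8Lin a b

theorem pvS8Low (l : Int) (h0 : 0 ≤ l) (h1 : l < 256) : pvS8 l = l <<< (8:Nat) := by
  unfold pvS8
  exact pvLoopLow l h0 h1

theorem pvS8High (x : Int) (h : PySem.Int.band x 65535 = 0) :
    PySem.Int.band (pvS8 x) 65535 = 0 := by
  unfold pvS8
  exact pvLoopHigh x h

theorem pvMakeCRC_A (crc field : Int) :
    makeCRC crc field
      = PySem.Int.band (pvS8 (PySem.Int.bxor crc (field <<< (8:Nat)))) 65535 := by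
  unfold makeCRC
  rw [pvRange8]
  rfl

theorem pvCrcHiEq (x : Int) : crcHi x = PySem.Int.band (pvS8 x) 65535 := by
  unfold crcHi
  rw [pvRange8]
  rfl

theorem makeCRC_eq (crc field : Int) : makeCRC crc field = makeCRC_alt crc field := by
  set v := PySem.Int.bxor crc (field <<< (8:Nat)) with hvdef
  set u := PySem.Int.band v 65535 with hudef
  set hq := u >>> (8:Nat) with hqdef
  set lu := PySem.Int.band u 255 with ludef
  set idx := PySem.Int.band (PySem.Int.bxor (crc >>> (8:Nat)) field) 255 with hidxdef
  have hub := pvBandBounds v 65535 (by norm_num)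
  have hqb : 0 ≤ hq ∧ hq < 256 := by
    rw [hqdef, Int.shiftRight_eq_div_pow]
    norm_num
    omega
  have hlb := pvBandBounds u 255 (by norm_num)
  have hidxb := pvBandBounds (PySem.Int.bxor (crc >>> (8:Nat)) field) 255 (by norm_num)
  rw [← ludef] at hlb
  rw [← hidxdef] at hidxb
  rw [← hudef] at hub
  have hqidx : hq = idx := pvHuEq crc field
  have hlucrc : lu = PySem.Int.band crc 255 := pvLuEq crc field
  -- A side
  have hA : makeCRC crc field = PySem.Int.bxor (PySem.Int.band (pvS8 (hq <<< (8:Nat))) 65535) (lu <<< (8:Nat)) := by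
    rw [pvMakeCRC_A crc field, ← hvdef]
    conv_lhs => rw [pvVDecomp v, ← hudef, pvS8Lin, pvBandBxor, pvS8High _ (pvRInv v),
      PySem.Int.bxor_zero]
    conv_lhs => rw [pvSplitHL u, ← hqdef, ← ludef, pvS8Lin, pvBandBxor,
      pvS8Low lu hlb.1 (by omega), pvBandSmall (lu <<< (8:Nat)) (by rw [pvShl8]; omega) (by rw [pvShl8]; omega)]
  -- B side
  have hB : makeCRC_alt crc field = PySem.Int.bxor ((PySem.Int.band crc 255) <<< (8:Nat)) (PySem.Int.band (pvS8 (idx <<< (8:Nat))) 65535) := by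
    unfold makeCRC_alt
    rw [← hidxdef]
    rw [show PySem.List.pyGetD crcTable idx 0 = crcHi (idx <<< (8:Nat)) from by
      unfold crcTable
      exact PySem.List.pyGetD_map_pyRange_of_nonneg _ 256 idx 0 hidxb.1 (by omega)]
    rw [pvBandBxor, pvCrcShl, pvCrcHiEq, pvBandBandSelf]
  rw [hA, hB, hqidx, hlucrc, PySem.Int.bxor_comm]

-- ===== VERDICT (by name: the statement is the Claim_ definition above) =====
theorem makeCRC_spec : Claim_equal_makeCRC := by
  intro crc field _
  show makeCRC crc field = makeCRC_alt crc field
  exact makeCRC_eq crc field
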